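-- pv_equiv track=rewrite | github.com/jjuraska/slug2slug | slot_aligner/slot_alignment.py | permuteSentCombos
-- ===== SOURCE A (Python) =====
-- import itertools
-- from collections import OrderedDict
--
-- def mergeOrderedDicts(mrs, order=None):
--     if order is None:
--         order = ['da', 'name', 'eattype', 'food', 'pricerange', 'customerrating', 'area', 'familyfriendly', 'near',
--                  'type', 'family', 'hasusbport', 'hdmiport', 'ecorating', 'screensizerange', 'screensize', 'pricerange', 'price', 'audio', 'resolution', 'powerconsumption', 'color', 'accessories', 'count',
--                  'processor', 'memory', 'driverange', 'drive', 'batteryrating', 'battery', 'weightrange', 'weight', 'dimension', 'design', 'utility', 'platform', 'isforbusinesscomputing', 'warranty']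
--     merged_mr = OrderedDict()
--     for slot in order:
--         for mr in mrs:
--             if slot in mr:
--                 merged_mr[slot] = mr[slot]
--                 break
--     return merged_mr
--
-- def mergeEntries(merge_tuples):
--     """
--     :param merge_tuples: list of (utterance, mr) tuples to merge into one pair
--     :return:
--     """
--     sent = ""
--     mr = OrderedDict()
--     mrs = []
--     for curr_sent, curr_mr in merge_tuples:
--         sent += " " + curr_sent
--         mrs.append(curr_mr)
--     mr = mergeOrderedDicts(mrs)
--     return mr, sent
--
-- def permuteSentCombos(newPairs, mrs, utterances, max_iter=False, depth=1, assume_root=False):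
--     """
--     :param newPairs: dict of {utterance:mr}
--     :param mrs: mrs list - assume it's passed in
--     :param utterances: utterance list - assume it's passed in
--     :param depth: the depth of the combinations. 1 for example means a root sentence + one follow on.
--         For example:
--         utterance: a. b. c. d.
--         depth 1, root a:
--         a. b., a. c., a. d.
--         depth 2, root a:
--         a. b. c., a. d. c., ...
--     :param assume_root: if we assume the first sentence in the list of sentences is the root most sentence, this is true,
--         if this is true then we will only consider combinations with the the first sentence being the root.
--         Note - a sentence is a "root" if it has the actual name of the restraunt in it. In many cases, there is only
--         one root anyways.
--     :return:
--     """
--     if len(newPairs) <= 1: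
--         return
--     roots = []
--     children = []
--     for sent, new_slots in newPairs.items():
--         if "name" in new_slots and new_slots["name"] in sent:
--             roots.append((sent, new_slots))
--         else:
--             children.append((sent, new_slots))
--     for root in roots:
--         tmp = children + roots
--         tmp.remove(root)
--
--         combs = []
--         for i in range(1, len(tmp) + 1):
--             els = [list(x) for x in itertools.combinations(tmp, i)]
--             combs.extend(els)
--
--         if max_iter:
--             depth = len(tmp)
--
--         for comb in combs:
--             if 0 < len(comb) <= depth:
--                 new_mr, new_utterance = mergeEntries([root] + comb)
--                 if "position" in new_mr:
--                     del new_mr["position"]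
--                 new_utterance = new_utterance.strip()
--                 if new_utterance not in utterances:
--                     mrs.append(new_mr)
--                     utterances.append(new_utterance)
--
--         if assume_root:
--             break
--     # frivolous return for potential debug
--     return utterances, mrs
-- ===== SOURCE B (Python) =====
-- # B: only enumerates combinations of size 1..depth (not all 2^n subsets), dedups
-- # utterances through a set, and merges MRs with a single first-value index pass.
-- # Like A, it mutates mrs/utterances in place; the equivalence claim is about the
-- # return value.
-- import itertools
--
-- _SLOT_ORDER = ['da', 'name', 'eattype', 'food', 'pricerange', 'customerrating', 'area', 'familyfriendly', 'near',
--                'type', 'family', 'hasusbport', 'hdmiport', 'ecorating', 'screensizerange', 'screensize', 'pricerange', 'price', 'audio', 'resolution', 'powerconsumption', 'color', 'accessories', 'count',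
--                'processor', 'memory', 'driverange', 'drive', 'batteryrating', 'battery', 'weightrange', 'weight', 'dimension', 'design', 'utility', 'platform', 'isforbusinesscomputing', 'warranty']
--
--
-- def permuteSentCombos(newPairs, mrs, utterances, max_iter=False, depth=1, assume_root=False):
--     if len(newPairs) <= 1:
--         return
--     roots = []
--     children = []
--     for sent, new_slots in newPairs.items():
--         if "name" in new_slots and new_slots["name"] in sent:
--             roots.append((sent, new_slots))
--         else:
--             children.append((sent, new_slots))
--
--     seen = set(utterances)
--     for root in roots:
--         tmp = children + roots
--         tmp.remove(root)
--         limit = len(tmp) if max_iter else min(depth, len(tmp))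
--
--         for size in range(1, limit + 1):
--             for comb in itertools.combinations(tmp, size):
--                 parts = (root,) + comb
--                 new_utterance = " ".join(s for s, _ in parts).strip()
--                 if new_utterance not in seen:
--                     first_vals = {}
--                     for _, mr in parts:
--                         for k, v in mr.items():
--                             if k not in first_vals:
--                                 first_vals[k] = v
--                     new_mr = {slot: first_vals[slot] for slot in _SLOT_ORDER if slot in first_vals}
--                     mrs.append(new_mr)
--                     utterances.append(new_utterance)
--                     seen.add(new_utterance)
--
--         if assume_root:
--             break
--     return utterances, mrs
-- ===== Notes on version B (the rewrite author's own statement) =====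
-- stated objective: alternative
-- what changed: B enumerates only combinations of size 1..min(depth, n) instead of materialising all 2^n subsets and filtering by size, dedups utterances through a set mirroring the list, and merges MRs with a single first-value index pass over the items instead of rescanning all MRs for each of the 38 ordered slots; on inputs with many sentences this avoids the exponential subset list, on the generated timing inputs it measured no faster.
import Mathlib
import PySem

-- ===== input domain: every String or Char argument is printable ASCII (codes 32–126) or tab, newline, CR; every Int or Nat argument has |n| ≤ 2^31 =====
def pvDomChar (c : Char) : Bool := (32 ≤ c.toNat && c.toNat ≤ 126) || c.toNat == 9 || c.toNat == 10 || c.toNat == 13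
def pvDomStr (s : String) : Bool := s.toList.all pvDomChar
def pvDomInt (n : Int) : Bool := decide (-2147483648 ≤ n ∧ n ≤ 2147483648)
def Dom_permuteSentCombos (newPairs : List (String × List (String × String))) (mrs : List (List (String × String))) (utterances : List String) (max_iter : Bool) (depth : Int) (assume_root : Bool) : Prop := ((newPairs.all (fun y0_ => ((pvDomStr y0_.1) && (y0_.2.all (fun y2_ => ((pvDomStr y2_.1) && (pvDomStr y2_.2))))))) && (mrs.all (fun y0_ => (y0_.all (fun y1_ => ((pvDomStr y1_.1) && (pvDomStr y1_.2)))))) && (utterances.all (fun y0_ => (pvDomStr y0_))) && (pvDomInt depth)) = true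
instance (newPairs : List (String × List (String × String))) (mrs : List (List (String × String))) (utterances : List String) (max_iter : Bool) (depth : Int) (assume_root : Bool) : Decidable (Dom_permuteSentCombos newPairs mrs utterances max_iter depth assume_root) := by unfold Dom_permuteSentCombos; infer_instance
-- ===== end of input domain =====

-- ===== PORT A =====
-- B replaces A's full-powerset enumeration by a size-bounded one, list-membership
-- dedup by a set, and A's per-slot rescan merge by one first-value index pass.
-- Both Pythons mutate mrs/utterances in place; the claim is about the return value.

-- slot order of mergeOrderedDicts (shared: both Pythons carry the same constant)
def pvOrder : List String :=
  ["da", "name", "eattype", "food", "pricerange", "customerrating", "area", "familyfriendly", "near",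
   "type", "family", "hasusbport", "hdmiport", "ecorating", "screensizerange", "screensize", "pricerange", "price", "audio", "resolution", "powerconsumption", "color", "accessories", "count",
   "processor", "memory", "driverange", "drive", "batteryrating", "battery", "weightrange", "weight", "dimension", "design", "utility", "platform", "isforbusinesscomputing", "warranty"]

-- the roots/children classification loop (identical in A and B, so shared)
def pvSplit (ps : List (String × List (String × String))) :
    List (String × List (String × String)) × List (String × List (String × String)) :=
  ps.foldl (fun rc p =>
    match (PySem.Dict.mk p.2).get? "name" with
    | some v => if PySem.Str.isIn v p.1 then (rc.1 ++ [p], rc.2) else (rc.1, rc.2 ++ [p])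
    | none => (rc.1, rc.2 ++ [p])) ([], [])

-- itertools.combinations(xs, k), in itertools order (used by both Pythons)
def pvCombos {a : Type} : Nat → List a → List (List a)
  | 0, _ => [[]]
  | _ + 1, [] => []
  | k + 1, x :: rest => (pvCombos k rest).map (x :: ·) ++ pvCombos (k + 1) rest

-- A: inner loop of mergeOrderedDicts ("for mr in mrs: if slot in mr: ...; break")
def pvLookupFirst (slot : String) : List (List (String × String)) → Option String
  | [] => none
  | mr :: rest =>
    match (PySem.Dict.mk mr).get? slot with
    | some v => some v
    | none => pvLookupFirst slot rest

-- A: mergeOrderedDicts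
def pvMergeA (ms : List (List (String × String))) : PySem.Dict String String :=
  pvOrder.foldl (fun d slot =>
    match pvLookupFirst slot ms with
    | some v => d.insert slot v
    | none => d) PySem.Dict.empty

-- A: mergeEntries (one pass accumulating the sentence and the mr list)
def pvMergeEntriesA (ps : List (String × List (String × String))) :
    PySem.Dict String String × List Char :=
  let acc := ps.foldl (fun (sm : List Char × List (List (String × String))) p =>
    (sm.1 ++ ' ' :: p.1.toList, sm.2 ++ [p.2])) ([], [])
  (pvMergeA acc.2, acc.1)

-- A: body of "for comb in combs"
def pvBodyA (depth : Int) (root : String × List (String × String))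
    (st : List String × List (List (String × String)))
    (comb : List (String × List (String × String))) :
    List String × List (List (String × String)) :=
  if 0 < (comb.length : Int) ∧ (comb.length : Int) ≤ depth then
    let me := pvMergeEntriesA (root :: comb)
    let newMr := me.1.erase "position"
    let u := String.mk (PySem.Chars.strip me.2)
    if st.1.contains u then st else (st.1 ++ [u], st.2 ++ [newMr.items])
  else st

-- A: loop over roots (depth is threaded because "depth = len(tmp)" persists)
def pvRootsA (children rootsAll : List (String × List (String × String)))
    (max_iter assume_root : Bool) :
    List (String × List (String × String)) → Int →
    List String × List (List (String × String)) →
    List String × List (List (String × String))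
  | [], _, st => st
  | r :: rest, depth, st =>
    let tmp0 := children ++ rootsAll
    let tmp := (PySem.List.remove? tmp0 r).getD tmp0
    let combs := (PySem.List.pyRange 1 (PySem.List.len tmp + 1) 1).foldl
      (fun acc i => acc ++ pvCombos i.toNat tmp) []
    let depth' := if max_iter then PySem.List.len tmp else depth
    let st' := combs.foldl (pvBodyA depth' r) st
    if assume_root then st' else pvRootsA children rootsAll max_iter assume_root rest depth' st'

def permuteSentCombos (newPairs : List (String × List (String × String))) (mrs : List (List (String × String))) (utterances : List String) (max_iter : Bool) (depth : Int) (assume_root : Bool) : Option (List String × (List (List (String × String)))) :=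
  if PySem.List.len newPairs <= 1 then none
  else
    let rc := pvSplit newPairs
    some (pvRootsA rc.2 rc.1 max_iter assume_root rc.1 depth (utterances, mrs))

-- ===== PORT B =====
-- B: one pass over all items collecting the first value seen for each key
def pvFirstVals (ps : List (String × List (String × String))) : PySem.Dict String String :=
  ps.foldl (fun d p =>
    p.2.foldl (fun d kv => if d.contains kv.1 then d else d.insert kv.1 kv.2) d)
    PySem.Dict.empty

-- B: {slot: first_vals[slot] for slot in _SLOT_ORDER if slot in first_vals}
def pvMergeB (ps : List (String × List (String × String))) : PySem.Dict String String :=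
  let fv := pvFirstVals ps
  pvOrder.foldl (fun d slot =>
    match fv.get? slot with
    | some v => d.insert slot v
    | none => d) PySem.Dict.empty

-- B: body of the inner combination loop (state carries the seen-set)
def pvBodyB (root : String × List (String × String))
    (st : (List String × List (List (String × String))) × PySem.Set String)
    (comb : List (String × List (String × String))) :
    (List String × List (List (String × String))) × PySem.Set String :=
  let parts := root :: comb
  let u := String.mk (PySem.Chars.strip (PySem.Chars.join [' '] (parts.map (fun p => p.1.toList))))
  if PySem.Set.contains st.2 u then st
  else ((st.1.1 ++ [u], st.1.2 ++ [(pvMergeB parts).items]), PySem.Set.add st.2 u)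

-- B: loop over roots; sizes only up to the effective limit, no per-comb filter
def pvRootsB (children rootsAll : List (String × List (String × String)))
    (max_iter assume_root : Bool) (depth : Int) :
    List (String × List (String × String)) →
    (List String × List (List (String × String))) × PySem.Set String →
    (List String × List (List (String × String))) × PySem.Set String
  | [], st => st
  | r :: rest, st =>
    let tmp0 := children ++ rootsAll
    let tmp := (PySem.List.remove? tmp0 r).getD tmp0
    let limit := if max_iter then PySem.List.len tmp else min depth (PySem.List.len tmp)
    let st' := (PySem.List.pyRange 1 (limit + 1) 1).foldl
      (fun s i => (pvCombos i.toNat tmp).foldl (pvBodyB r) s) st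
    if assume_root then st' else pvRootsB children rootsAll max_iter assume_root depth rest st'

def permuteSentCombos_alt (newPairs : List (String × List (String × String))) (mrs : List (List (String × String))) (utterances : List String) (max_iter : Bool) (depth : Int) (assume_root : Bool) : Option (List String × (List (List (String × String)))) :=
  if PySem.List.len newPairs <= 1 then none
  else
    let rc := pvSplit newPairs
    some (pvRootsB rc.2 rc.1 max_iter assume_root depth rc.1
      ((utterances, mrs), PySem.Set.ofList utterances)).1

-- ===== PRECONDITION & SPEC =====
def Spec_permuteSentCombos (newPairs : List (String × List (String × String))) (mrs : List (List (String × String))) (utterances : List String) (max_iter : Bool) (depth : Int) (assume_root : Bool) (out : Option (List String × (List (List (String × String))))) : Prop := out = permuteSentCombos_alt newPairs mrs utterances max_iter depth assume_root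
instance (newPairs : List (String × List (String × String))) (mrs : List (List (String × String))) (utterances : List String) (max_iter : Bool) (depth : Int) (assume_root : Bool) (out : Option (List String × (List (List (String × String))))) : Decidable (Spec_permuteSentCombos newPairs mrs utterances max_iter depth assume_root out) := by unfold Spec_permuteSentCombos; infer_instance

-- ===== CLAIM (what is proved, stated in full; the proofs are below) =====
def Claim_equal_permuteSentCombos : Prop := ∀ (newPairs : List (String × List (String × String))) (mrs : List (List (String × String))) (utterances : List String) (max_iter : Bool) (depth : Int) (assume_root : Bool), Dom_permuteSentCombos newPairs mrs utterances max_iter depth assume_root → Spec_permuteSentCombos newPairs mrs utterances max_iter depth assume_root (permuteSentCombos newPairs mrs utterances max_iter depth assume_root)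

-- ===== LEMMAS AND PROOFS =====

-- Merging: the first-value index of B answers the same lookups as A's rescans
theorem pvGet?_itemsFold (items : List (String × String)) (d : PySem.Dict String String) (k : String) :
    (items.foldl (fun d kv => if d.contains kv.1 then d else d.insert kv.1 kv.2) d).get? k
      = (d.get? k).or ((PySem.Dict.mk items).get? k) := by
  induction items generalizing d with
  | nil => simp [PySem.Dict.get?]
  | cons a rest ih =>
    simp only [List.foldl_cons]
    rw [ih, PySem.Dict.get?_mk_cons]
    by_cases hc : d.contains a.1
    · rw [if_pos hc]
      by_cases hk : a.1 = k
      · subst hk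
        have hs : (d.get? a.1).isSome := by rw [← PySem.Dict.contains_eq_isSome_get?]; exact hc
        obtain ⟨v, hv⟩ := Option.isSome_iff_exists.mp hs
        simp [hv]
      · simp [hk]
    · rw [if_neg hc]
      rw [PySem.Dict.get?_insert]
      have hn : d.get? a.1 = none := by
        rw [PySem.Dict.contains_eq_isSome_get?] at hc
        simpa using hc
      by_cases hk : k = a.1
      · subst hk; simp [hn]
      · rw [if_neg hk, if_neg (fun h => hk (eq_of_beq h).symm)]

theorem pvGet?_firstVals (ps : List (String × List (String × String)))
    (d : PySem.Dict String String) (k : String) :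
    (ps.foldl (fun d p =>
      p.2.foldl (fun d kv => if d.contains kv.1 then d else d.insert kv.1 kv.2) d) d).get? k
      = (d.get? k).or (pvLookupFirst k (ps.map (·.2))) := by
  induction ps generalizing d with
  | nil => simp [pvLookupFirst]
  | cons p rest ih =>
    simp only [List.foldl_cons, List.map_cons]
    rw [ih, pvGet?_itemsFold]
    cases h : (PySem.Dict.mk p.2).get? k <;> simp [pvLookupFirst, h]

theorem pvMergeA_eq_mergeB (ps : List (String × List (String × String))) :
    pvMergeA (ps.map (·.2)) = pvMergeB ps := by
  have h : ∀ slot, (pvFirstVals ps).get? slot = pvLookupFirst slot (ps.map (·.2)) := by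
    intro slot
    rw [pvFirstVals, pvGet?_firstVals]
    simp [PySem.Dict.get?, PySem.Dict.empty]
  simp only [pvMergeA, pvMergeB, h]

theorem pvMem_keys_orderFold (order : List String) (f : String → Option String)
    (d : PySem.Dict String String) (k : String)
    (h : k ∈ (order.foldl (fun d slot =>
      match f slot with | some v => d.insert slot v | none => d) d).keys) :
    k ∈ d.keys ∨ k ∈ order := by
  induction order generalizing d with
  | nil => exact Or.inl h
  | cons o rest ih =>
    simp only [List.foldl_cons] at h
    rcases ih _ h with h' | h'
    · cases hf : f o with
      | none => rw [hf] at h'; exact Or.inl h'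
      | some v =>
        rw [hf] at h'
        have h2 : k = o ∨ k ∈ d.keys := by
          simpa [PySem.Dict.mem_keys_insert] using h'
        rcases h2 with h'' | h''
        · exact Or.inr (by simp [h''])
        · exact Or.inl h''
    · exact Or.inr (List.mem_cons_of_mem _ h')

theorem pvMergeA_erase_position (ms : List (List (String × String))) :
    (pvMergeA ms).erase "position" = pvMergeA ms := by
  have hk : ∀ k ∈ (pvMergeA ms).keys, k ∈ pvOrder := by
    intro k hkm
    rcases pvMem_keys_orderFold pvOrder (fun slot => pvLookupFirst slot ms)
      PySem.Dict.empty k (by rw [pvMergeA] at hkm; exact hkm) with h | h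
    · simp [PySem.Dict.empty, PySem.Dict.keys] at h
    · exact h
  have hpos : ∀ x ∈ pvOrder, x ≠ "position" := by decide
  apply PySem.Dict.ext
  show ((pvMergeA ms).items.filter _) = (pvMergeA ms).items
  rw [List.filter_eq_self]
  intro p hp
  have : p.1 ∈ (pvMergeA ms).keys := by
    simp only [PySem.Dict.keys]
    exact List.mem_map_of_mem hp
  simpa using hpos p.1 (hk p.1 this)

-- Sentences: A's fold-concatenation, stripped, is B's join, stripped
theorem pvSentFold (ps : List (String × List (String × String)))
    (cs : List Char) (ms : List (List (String × String))) :
    ps.foldl (fun (sm : List Char × List (List (String × String))) p =>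
        (sm.1 ++ ' ' :: p.1.toList, sm.2 ++ [p.2])) (cs, ms)
      = (cs ++ ps.flatMap (fun p => ' ' :: p.1.toList), ms ++ ps.map (·.2)) := by
  induction ps generalizing cs ms with
  | nil => simp
  | cons p rest ih =>
    simp only [List.foldl_cons, List.flatMap_cons, List.map_cons]
    rw [ih]
    simp

theorem pvFlatMap_space_cons (l : List (List Char)) (hl : l ≠ []) :
    l.flatMap (fun c => ' ' :: c) = ' ' :: PySem.Chars.join [' '] l := by
  induction l with
  | nil => simp at hl
  | cons a t ih =>
    cases t with
    | nil => simp [PySem.Chars.join, List.intercalate]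
    | cons b t' =>
      rw [List.flatMap_cons, ih (by simp), PySem.Chars.join_cons_cons]
      simp

theorem pvStrip_space_cons (cs : List Char) :
    PySem.Chars.strip (' ' :: cs) = PySem.Chars.strip cs := by
  simp [PySem.Chars.strip, PySem.Chars.lstrip, PySem.Chars.isspace]

-- Dedup: the set B maintains is exactly the set of utterances collected so far
theorem pvOfList_append (l : List String) (u : String) :
    PySem.Set.ofList (l ++ [u]) = PySem.Set.add (PySem.Set.ofList l) u := by
  rw [PySem.Set.ofList_eq_foldl, PySem.Set.ofList_eq_foldl, List.foldl_append]
  rfl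

theorem pvContains_ofList (l : List String) (u : String) :
    PySem.Set.contains (PySem.Set.ofList l) u = l.contains u := by
  by_cases h : u ∈ l <;> simp [PySem.Set.contains, PySem.Set.mem_ofList, h]

-- Combinations
theorem pvCombos_length {a : Type} :
    ∀ (k : Nat) (xs : List a), ∀ c ∈ pvCombos k xs, c.length = k := by
  intro k
  induction k using Nat.strong_induction_on with
  | _ k ihk =>
  intro xs
  induction xs generalizing k with
  | nil =>
    intro c hc
    match k with
    | 0 => simp [pvCombos] at hc; simp [hc]
    | k + 1 => simp [pvCombos] at hc
  | cons x rest ih =>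
    intro c hc
    match k with
    | 0 => simp [pvCombos] at hc; simp [hc]
    | k + 1 =>
      simp only [pvCombos, List.mem_append, List.mem_map] at hc
      rcases hc with ⟨c', hc', rfl⟩ | hc
      · simp [ihk k (Nat.lt_succ_self k) rest c' hc']
      · exact ih (k + 1) (fun j hj => ihk j hj) c hc

theorem pvFoldl_flatMap {a b s : Type} (g : a → List b) (f : s → b → s) (l : List a) (st : s) :
    (l.flatMap g).foldl f st = l.foldl (fun st x => (g x).foldl f st) st := by
  induction l generalizing st with
  | nil => rfl
  | cons x t ih => simp [List.flatMap_cons, List.foldl_append, ih]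

theorem pvPyRange_succ_map (n : Nat) :
    PySem.List.pyRange 1 ((n : Int) + 1) 1 = (List.range n).map (fun j => ((j : Int) + 1)) := by
  induction n with
  | zero => rfl
  | succ n ih =>
    have h1 : ((n + 1 : Nat) : Int) + 1 = ((n : Int) + 1) + 1 := by push_cast; ring
    rw [h1, PySem.List.pyRange_one_succ_right (by omega), ih, List.range_succ]
    simp

theorem pvPyRange_int_map (m : Int) :
    PySem.List.pyRange 1 (m + 1) 1 = (List.range m.toNat).map (fun j => ((j : Int) + 1)) := by
  by_cases h : 0 ≤ m
  · have := pvPyRange_succ_map m.toNat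
    rwa [Int.toNat_of_nonneg h] at this
  · have hm : m.toNat = 0 := Int.toNat_of_nonpos (le_of_lt (not_le.mp h))
    rw [hm]
    have : PySem.List.pyRange 1 (m + 1) 1 = [] := by
      apply List.eq_nil_iff_forall_not_mem.mpr
      intro x hx
      have := (PySem.List.mem_pyRange_one.mp hx)
      omega
    simp [this]

-- Per-combination step equivalence
theorem pvBody_eq (depth : Int) (r : String × List (String × String))
    (st : List String × List (List (String × String)))
    (comb : List (String × List (String × String)))
    (h1 : comb ≠ []) (h2 : (comb.length : Int) ≤ depth) :
    pvBodyB r (st, PySem.Set.ofList st.1) comb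
      = (pvBodyA depth r st comb, PySem.Set.ofList (pvBodyA depth r st comb).1) := by
  have hg : 0 < (comb.length : Int) ∧ (comb.length : Int) ≤ depth := by
    refine ⟨?_, h2⟩
    have := List.length_pos_iff.mpr h1
    omega
  have hme : pvMergeEntriesA (r :: comb)
      = (pvMergeA ((r :: comb).map (·.2)), (r :: comb).flatMap (fun p => ' ' :: p.1.toList)) := by
    rw [pvMergeEntriesA, pvSentFold]
    simp
  have h3 : (r :: comb).flatMap (fun p => ' ' :: p.1.toList)
      = ((r :: comb).map (fun p => p.1.toList)).flatMap (fun c => ' ' :: c) := by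
    simp [List.flatMap_map]
  have hu : PySem.Chars.strip ((r :: comb).flatMap (fun p => ' ' :: p.1.toList))
      = PySem.Chars.strip (PySem.Chars.join [' '] ((r :: comb).map (fun p => p.1.toList))) := by
    rw [h3, pvFlatMap_space_cons _ (by simp), pvStrip_space_cons]
  have hmr : (pvMergeA ((r :: comb).map (·.2))).erase "position" = pvMergeB (r :: comb) := by
    rw [pvMergeA_erase_position, pvMergeA_eq_mergeB]
  rw [pvBodyA, pvBodyB]
  simp only [if_pos hg, hme, hu, hmr, pvContains_ofList]
  by_cases hm : (String.mk (PySem.Chars.strip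
      (PySem.Chars.join [' '] ((r :: comb).map (fun p => p.1.toList))))) ∈ st.1
  all_goals simp only [List.map_cons] at hm
  · simp [hm]
  · simp [hm, pvOfList_append]

theorem pvBlock_eq (depth : Int) (r : String × List (String × String))
    (cs : List (List (String × List (String × String))))
    (h : ∀ c ∈ cs, c ≠ [] ∧ (c.length : Int) ≤ depth) :
    ∀ st, cs.foldl (pvBodyB r) (st, PySem.Set.ofList st.1)
      = (cs.foldl (pvBodyA depth r) st, PySem.Set.ofList (cs.foldl (pvBodyA depth r) st).1) := by
  induction cs with
  | nil => intro st; rfl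
  | cons c t ih =>
    intro st
    simp only [List.foldl_cons]
    rw [pvBody_eq depth r st c (h c (by simp)).1 (h c (by simp)).2]
    exact ih (fun c' hc' => h c' (by simp [hc'])) _

theorem pvBlock_noop (depth : Int) (r : String × List (String × String))
    (cs : List (List (String × List (String × String))))
    (h : ∀ c ∈ cs, ¬ (0 < (c.length : Int) ∧ (c.length : Int) ≤ depth)) (st) :
    cs.foldl (pvBodyA depth r) st = st := by
  induction cs generalizing st with
  | nil => rfl
  | cons c t ih =>
    simp only [List.foldl_cons]
    rw [show pvBodyA depth r st c = st by rw [pvBodyA, if_neg (h c (by simp))]]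
    exact ih (fun c' hc' => h c' (by simp [hc'])) st

theorem pvFlatMapCast (tmp : List (String × List (String × String))) (js : List Nat) :
    (js.map (fun j => ((j : Int) + 1))).flatMap (fun i => pvCombos i.toNat tmp)
      = js.flatMap (fun j => pvCombos (j + 1) tmp) := by
  induction js with
  | nil => rfl
  | cons j t ih =>
    simp only [List.pure_def, List.bind_eq_flatMap, List.flatMap_cons,
      List.singleton_append, List.map_cons] at ih ⊢
    rw [show ((j : Int) + 1).toNat = j + 1 by omega, ih]

theorem pvFoldlCast {S : Type} (tmp : List (String × List (String × String)))
    (g : S → List (String × List (String × String)) → S) (js : List Nat) :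
    ∀ s : S, (js.map (fun j => ((j : Int) + 1))).foldl
        (fun s i => (pvCombos i.toNat tmp).foldl g s) s
      = js.foldl (fun s j => (pvCombos (j + 1) tmp).foldl g s) s := by
  induction js with
  | nil => intro s; rfl
  | cons j t ih =>
    intro s
    simp only [List.pure_def, List.bind_eq_flatMap, List.flatMap_cons,
      List.singleton_append, List.map_cons, List.foldl_cons] at ih ⊢
    rw [show ((j : Int) + 1).toNat = j + 1 by omega]
    exact ih _

theorem pvBlocksB_eq (depth : Int) (r : String × List (String × String))
    (tmp : List (String × List (String × String))) (js : List Nat)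
    (h : ∀ j ∈ js, ((j : Int) + 1) ≤ depth) :
    ∀ st, js.foldl (fun s j => (pvCombos (j + 1) tmp).foldl (pvBodyB r) s) (st, PySem.Set.ofList st.1)
      = (js.foldl (fun s j => (pvCombos (j + 1) tmp).foldl (pvBodyA depth r) s) st,
         PySem.Set.ofList (js.foldl (fun s j => (pvCombos (j + 1) tmp).foldl (pvBodyA depth r) s) st).1) := by
  induction js with
  | nil => intro st; rfl
  | cons j t ih =>
    intro st
    simp only [List.foldl_cons]
    rw [pvBlock_eq depth r (pvCombos (j + 1) tmp) ?_ st]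
    · exact ih (fun j' hj' => h j' (by simp [hj'])) _
    · intro c hc
      have hl := pvCombos_length (j + 1) tmp c hc
      refine ⟨by simp [← List.length_pos_iff, hl], ?_⟩
      rw [hl]
      exact_mod_cast h j (by simp)

theorem pvBlocksA_noop (depth : Int) (r : String × List (String × String))
    (tmp : List (String × List (String × String))) (js : List Nat)
    (h : ∀ j ∈ js, depth < (j : Int) + 1) :
    ∀ st, js.foldl (fun s j => (pvCombos (j + 1) tmp).foldl (pvBodyA depth r) s) st = st := by
  induction js with
  | nil => intro st; rfl
  | cons j t ih =>
    intro st
    simp only [List.foldl_cons]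
    rw [pvBlock_noop depth r (pvCombos (j + 1) tmp) ?_ st]
    · exact ih (fun j' hj' => h j' (by simp [hj'])) st
    · intro c hc
      have hl := pvCombos_length (j + 1) tmp c hc
      rw [hl]
      intro hcon
      have := h j (by simp)
      have := hcon.2
      push_cast at this ⊢
      omega

theorem pvEnum_eq (d' : Int) (r : String × List (String × String))
    (tmp : List (String × List (String × String)))
    (st : List String × List (List (String × String))) :
    (PySem.List.pyRange 1 (min d' (PySem.List.len tmp) + 1) 1).foldl
        (fun s i => (pvCombos i.toNat tmp).foldl (pvBodyB r) s) (st, PySem.Set.ofList st.1)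
      = (((PySem.List.pyRange 1 (PySem.List.len tmp + 1) 1).foldl
            (fun acc i => acc ++ pvCombos i.toNat tmp) []).foldl (pvBodyA d' r) st,
         PySem.Set.ofList (((PySem.List.pyRange 1 (PySem.List.len tmp + 1) 1).foldl
            (fun acc i => acc ++ pvCombos i.toNat tmp) []).foldl (pvBodyA d' r) st).1) := by
  have hlen : PySem.List.len tmp = (tmp.length : Int) := by simp [PySem.List.len_eq]
  set n := tmp.length with hn
  set L := (min d' (n : Int)).toNat with hL
  have hLn : L ≤ n := by omega
  -- A's combination list is the concatenation of the size-1..n blocks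
  have hA : ((PySem.List.pyRange 1 (PySem.List.len tmp + 1) 1).foldl
        (fun acc i => acc ++ pvCombos i.toNat tmp) [])
      = (List.range n).flatMap (fun j => pvCombos (j + 1) tmp) := by
    rw [hlen, pvPyRange_succ_map, PySem.List.foldl_append_eq_flatMap,
      List.nil_append, pvFlatMapCast]
  -- B's range is the first L blocks
  have hB : PySem.List.pyRange 1 (min d' (PySem.List.len tmp) + 1) 1
      = (List.range L).map (fun j => ((j : Int) + 1)) := by
    rw [hlen, pvPyRange_int_map]
  rw [hA, hB, pvFoldl_flatMap]
  rw [pvFoldlCast]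
  rw [show List.range n = List.range L ++ (List.range (n - L)).map (L + ·) by
    conv_lhs => rw [show n = L + (n - L) by omega]
    rw [List.range_add]]
  have hnoop := pvBlocksA_noop d' r tmp ((List.range (n - L)).map (L + ·)) (by
    intro j' hj'
    simp only [List.mem_map, List.mem_range] at hj'
    obtain ⟨j, hj, rfl⟩ := hj'
    omega)
  rw [List.foldl_append, hnoop]
  exact pvBlocksB_eq d' r tmp (List.range L) (by
    intro j hj
    simp only [List.mem_range] at hj
    omega) st

-- One root processed: A's filtered full enumeration = B's bounded enumeration
theorem pvRoot_step (max_iter : Bool) (depth : Int)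
    (r : String × List (String × String)) (tmp : List (String × List (String × String)))
    (st : List String × List (List (String × String))) :
    (PySem.List.pyRange 1 ((if max_iter then PySem.List.len tmp else min depth (PySem.List.len tmp)) + 1) 1).foldl
        (fun s i => (pvCombos i.toNat tmp).foldl (pvBodyB r) s) (st, PySem.Set.ofList st.1)
      = (((PySem.List.pyRange 1 (PySem.List.len tmp + 1) 1).foldl
            (fun acc i => acc ++ pvCombos i.toNat tmp) []).foldl
          (pvBodyA (if max_iter then PySem.List.len tmp else depth) r) st,
        PySem.Set.ofList (((PySem.List.pyRange 1 (PySem.List.len tmp + 1) 1).foldl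
            (fun acc i => acc ++ pvCombos i.toNat tmp) []).foldl
          (pvBodyA (if max_iter then PySem.List.len tmp else depth) r) st).1) := by
  have h := pvEnum_eq (if max_iter then PySem.List.len tmp else depth) r tmp st
  cases max_iter
  · simpa using h
  · simpa using h

theorem pvRoots_eq (children rootsAll : List (String × List (String × String)))
    (max_iter assume_root : Bool) (depth : Int) :
    ∀ (rest : List (String × List (String × String))) (d : Int)
      (st : List String × List (List (String × String))),
      (max_iter = false → d = depth) →
      pvRootsB children rootsAll max_iter assume_root depth rest (st, PySem.Set.ofList st.1)
        = (pvRootsA children rootsAll max_iter assume_root rest d st,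
           PySem.Set.ofList (pvRootsA children rootsAll max_iter assume_root rest d st).1) := by
  intro rest
  induction rest with
  | nil => intro d st _; rfl
  | cons r t ih =>
    intro d st h
    simp only [pvRootsA, pvRootsB]
    have hd : (if max_iter then PySem.List.len
          ((PySem.List.remove? (children ++ rootsAll) r).getD (children ++ rootsAll)) else d)
        = (if max_iter then PySem.List.len
          ((PySem.List.remove? (children ++ rootsAll) r).getD (children ++ rootsAll)) else depth) := by
      cases max_iter
      · simp [h rfl]
      · simp
    rw [hd]
    rw [pvRoot_step max_iter depth r
      ((PySem.List.remove? (children ++ rootsAll) r).getD (children ++ rootsAll)) st]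
    cases assume_root
    · simp only [Bool.false_eq_true, if_false]
      exact ih _ _ (fun hmi => by
        cases max_iter
        · simp [h rfl]
        · simp at hmi)

    · simp

-- ===== VERDICT (by name: the statement is the Claim_ definition above) =====
theorem permuteSentCombos_spec : Claim_equal_permuteSentCombos := by
  intro newPairs mrs utterances max_iter depth assume_root _
  unfold Spec_permuteSentCombos permuteSentCombos permuteSentCombos_alt
  split
  · rfl
  · have h := pvRoots_eq (pvSplit newPairs).2 (pvSplit newPairs).1 max_iter assume_root depth
      (pvSplit newPairs).1 depth (utterances, mrs) (fun _ => rfl)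
    show some _ = some (pvRootsB _ _ _ _ _ _ ((utterances, mrs), PySem.Set.ofList utterances)).1
    rw [show (PySem.Set.ofList utterances : PySem.Set String)
      = PySem.Set.ofList ((utterances, mrs) : List String × List (List (String × String))).1 from rfl, h]
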